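-- pv_equiv track=rewrite | github.com/atchayalakshmi-b/Real-Time-Facial-Emotion-Detection-System | AI trial2/app.py | mode_smooth
-- ===== SOURCE A (Python) =====
-- from collections import Counter, deque
--
-- def mode_smooth(values):
--     if not values:
--         return None
--     counts = Counter(values)
--     max_count = max(counts.values())
--     candidates = [v for v, c in counts.items() if c == max_count]
--     for v in reversed(values):
--         if v in candidates:
--             return v
--     return values[-1]
-- ===== SOURCE B (Python) =====
-- def mode_smooth(values):
--     if not values:
--         return None
--     counts = {}
--     last_index = {}
--     for i, v in enumerate(values):
--         counts[v] = counts.get(v, 0) + 1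
--         last_index[v] = i
--     return max(counts, key=lambda v: (counts[v], last_index[v]))
-- ===== Notes on version B (the rewrite author's own statement) =====
-- stated objective: simpler
-- what changed: One enumerate pass builds a count table and a last-index table, then a single keyed max over the distinct values replaces A's Counter + max of counts + candidate-list construction + reverse membership scan.
import Mathlib
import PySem

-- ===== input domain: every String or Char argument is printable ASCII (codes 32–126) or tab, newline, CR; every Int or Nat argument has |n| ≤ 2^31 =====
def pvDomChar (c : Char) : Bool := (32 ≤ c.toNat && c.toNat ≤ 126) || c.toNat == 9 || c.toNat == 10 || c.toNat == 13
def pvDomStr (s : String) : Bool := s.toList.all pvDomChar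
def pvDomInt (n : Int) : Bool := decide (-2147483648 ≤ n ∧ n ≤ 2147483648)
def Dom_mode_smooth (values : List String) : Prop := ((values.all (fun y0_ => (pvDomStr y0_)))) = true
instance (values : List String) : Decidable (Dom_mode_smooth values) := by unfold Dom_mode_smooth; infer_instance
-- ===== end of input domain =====

-- B replaces A's Counter + max-count + candidate list + reverse membership scan by one
-- enumerate pass building count and last-index tables and a single keyed max (objective: simpler).

-- ===== PORT A =====
def mode_smooth (values : List String) : Option String :=
  if values = [] then none
  else
    let counts := PySem.Dict.counter values
    match PySem.List.max? counts.values (fun c => c) with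
    | none => none  -- unreachable here (Python's max would raise on an empty Counter)
    | some max_count =>
      let candidates := (counts.items.filter (fun p => p.2 == max_count)).map (fun p => p.1)
      match values.reverse.find? (fun v => candidates.contains v) with
      | some v => some v
      | none => PySem.List.pyGet? values (-1)

-- ===== PORT B =====
def mode_smooth_alt (values : List String) : Option String :=
  if values = [] then none
  else
    let p := (PySem.List.enumerate values).foldl
      (fun (p : PySem.Dict String Int × PySem.Dict String Int) iv =>
        (p.1.insert iv.2 (p.1.getD iv.2 0 + 1), p.2.insert iv.2 iv.1))
      (PySem.Dict.empty, PySem.Dict.empty)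
    PySem.List.max2? p.1.keys (fun v => p.1.getD v 0) (fun v => p.2.getD v 0)

-- ===== PRECONDITION & SPEC =====
def Spec_mode_smooth (values : List String) (out : Option String) : Prop := out = mode_smooth_alt values
instance (values : List String) (out : Option String) : Decidable (Spec_mode_smooth values out) := by unfold Spec_mode_smooth; infer_instance

-- ===== CLAIM (what is proved, stated in full; the proofs are below) =====
def Claim_equal_mode_smooth : Prop := ∀ (values : List String), Dom_mode_smooth values → Spec_mode_smooth values (mode_smooth values)

-- ===== LEMMAS AND PROOFS =====

-- lexicographic ≤ on the (count, last-index) key pairs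
def LexLE (a b : Int × Int) : Prop := a.1 < b.1 ∨ (a.1 = b.1 ∧ a.2 ≤ b.2)

-- B's paired fold splits into the count fold and the last-index fold
theorem pairFold_split (xs : List String) (s : Int)
    (d1 d2 : PySem.Dict String Int) :
    (PySem.List.enumerate xs s).foldl
      (fun (p : PySem.Dict String Int × PySem.Dict String Int) iv =>
        (p.1.insert iv.2 (p.1.getD iv.2 0 + 1), p.2.insert iv.2 iv.1)) (d1, d2)
    = (xs.foldl (fun d x => d.insert x (d.getD x 0 + 1)) d1,
       (PySem.List.enumerate xs s).foldl (fun d iv => d.insert iv.2 iv.1) d2) := by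
  induction xs generalizing s d1 d2 with
  | nil => simp [PySem.List.enumerate]
  | cons x xs ih => simp only [PySem.List.enumerate_cons, List.foldl_cons]; exact ih _ _ _

-- the last-index fold stores, for each v ∈ xs, the index (in enumerate numbering) of its last occurrence
theorem lastFold_get? (xs : List String) (s : Int) (d : PySem.Dict String Int) (v : String) :
    ((PySem.List.enumerate xs s).foldl (fun d iv => d.insert iv.2 iv.1) d).get? v
    = if v ∈ xs then some (s + (xs.length : Int) - 1 - (xs.reverse.idxOf v : Int))
      else d.get? v := by
  induction xs generalizing s d with
  | nil => simp [PySem.List.enumerate]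
  | cons x xs ih =>
    simp only [PySem.List.enumerate_cons, List.foldl_cons]
    rw [ih]
    by_cases hx : v ∈ xs
    · have hvr : v ∈ xs.reverse := List.mem_reverse.mpr hx
      simp [hx, List.mem_cons.mpr (Or.inr hx), List.idxOf_append, hvr]
      omega
    · by_cases hvx : v = x
      · subst hvx
        have hnr : v ∉ xs.reverse := fun h => hx (List.mem_reverse.mp h)
        have hidx : List.idxOf v (xs.reverse ++ [v]) = xs.reverse.length := by
          rw [List.idxOf_append, if_neg hnr]
          simp
        simp [hx, hidx, PySem.Dict.get?_insert_self]
        omega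
      · simp [hx, hvx, PySem.Dict.get?_insert_of_ne d _ hvx]

-- find? returns the first match: its idxOf is minimal among all matches
theorem find?_idxOf_min (l : List String) (p : String → Bool) (r : String)
    (h : l.find? p = some r) :
    ∀ m ∈ l, p m = true → l.idxOf r ≤ l.idxOf m := by
  induction l with
  | nil => simp at h
  | cons a l ih =>
    intro m hm hpm
    by_cases hpa : p a
    · have hr : r = a := by
        rw [List.find?_cons_of_pos hpa] at h
        exact (Option.some.inj h).symm
      subst hr
      simp [List.idxOf_cons_self]
    · have h' : l.find? p = some r := by rwa [List.find?_cons_of_neg hpa] at h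
      have hra : r ≠ a := by
        rintro rfl
        exact hpa (List.find?_some h')
      rcases List.mem_cons.mp hm with rfl | hml
      · exact absurd hpm hpa
      · have hma : m ≠ a := by rintro rfl; exact hpa hpm
        rw [List.idxOf_cons_ne _ (Ne.symm hra), List.idxOf_cons_ne _ (Ne.symm hma)]
        have := ih h' m hml hpm
        omega

-- the step function of PySem.List.max2?'s fold
def m2step (k1 k2 : String → Int) (acc : Option String) (x : String) : Option String :=
  match acc with
  | none => some x
  | some mm =>
    if (decide (k1 mm < k1 x) || !decide (k1 x < k1 mm) && decide (k2 mm < k2 x)) = true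
    then some x else some mm

theorem max2?_eq_foldl_m2step (k1 k2 : String → Int) (xs : List String) :
    PySem.List.max2? xs k1 k2 = xs.foldl (m2step k1 k2) none := by
  unfold PySem.List.max2? m2step
  congr 1
  funext acc x
  cases acc <;> rfl

-- max2? fold invariant: the kept element is a lexicographic maximum
theorem max2fold_max (k1 k2 : String → Int) (xs : List String) (acc : Option String) (m : String)
    (h : xs.foldl (m2step k1 k2) acc = some m) :
    (acc = some m ∨ m ∈ xs) ∧ (∀ y, acc = some y → LexLE (k1 y, k2 y) (k1 m, k2 m))
      ∧ (∀ y ∈ xs, LexLE (k1 y, k2 y) (k1 m, k2 m)) := by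
  induction xs generalizing acc with
  | nil =>
    simp only [List.foldl_nil] at h
    exact ⟨Or.inl h, fun y hy => by rw [hy] at h; cases h; exact Or.inr ⟨rfl, le_refl _⟩,
      by simp⟩
  | cons x xs ih =>
    simp only [List.foldl_cons] at h
    cases acc with
    | none =>
      rw [show m2step k1 k2 none x = some x from rfl] at h
      obtain ⟨h1, h2, h3⟩ := ih _ h
      refine ⟨Or.inr ?_, by simp, ?_⟩
      · rcases h1 with h1 | h1
        · exact List.mem_cons.mpr (Or.inl (by cases h1; rfl))
        · exact List.mem_cons.mpr (Or.inr h1)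
      · intro y hy
        rcases List.mem_cons.mp hy with rfl | hy'
        · exact h2 _ rfl
        · exact h3 _ hy'
    | some a =>
      by_cases hc : (decide (k1 a < k1 x) || !decide (k1 x < k1 a) && decide (k2 a < k2 x)) = true
      · rw [show m2step k1 k2 (some a) x = some x by
            simp only [m2step]; rw [if_pos hc]] at h
        obtain ⟨h1, h2, h3⟩ := ih _ h
        have hax : LexLE (k1 a, k2 a) (k1 m, k2 m) := by
          have hxm : LexLE (k1 x, k2 x) (k1 m, k2 m) := h2 _ rfl
          simp only [Bool.or_eq_true, Bool.and_eq_true, decide_eq_true_eq, Bool.not_eq_true',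
            decide_eq_false_iff_not] at hc
          unfold LexLE at *
          rcases hxm with h' | h' <;> rcases hc with hc | hc <;>
            simp only at * <;> omega
        refine ⟨Or.inr ?_, fun y hy => by cases hy; exact hax, ?_⟩
        · rcases h1 with h1 | h1
          · exact List.mem_cons.mpr (Or.inl (by cases h1; rfl))
          · exact List.mem_cons.mpr (Or.inr h1)
        · intro y hy
          rcases List.mem_cons.mp hy with rfl | hy'
          · exact h2 _ rfl
          · exact h3 _ hy'
      · rw [show m2step k1 k2 (some a) x = some a by
            simp only [m2step]; rw [if_neg hc]] at h
        obtain ⟨h1, h2, h3⟩ := ih _ h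
        have hxm : LexLE (k1 x, k2 x) (k1 m, k2 m) := by
          have ham : LexLE (k1 a, k2 a) (k1 m, k2 m) := h2 _ rfl
          simp only [Bool.or_eq_true, Bool.and_eq_true, decide_eq_true_eq, Bool.not_eq_true',
            decide_eq_false_iff_not, not_or, not_and, not_lt] at hc
          unfold LexLE at *
          rcases ham with h' | h' <;> simp only at * <;> omega
        refine ⟨?_, h2, ?_⟩
        · rcases h1 with h1 | h1
          · exact Or.inl h1
          · exact Or.inr (List.mem_cons.mpr (Or.inr h1))
        · intro y hy
          rcases List.mem_cons.mp hy with rfl | hy'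
          · exact hxm
          · exact h3 _ hy'

theorem max2fold_isSome (k1 k2 : String → Int) (xs : List String) (a : String) :
    ∃ m, xs.foldl (m2step k1 k2) (some a) = some m := by
  induction xs generalizing a with
  | nil => exact ⟨a, rfl⟩
  | cons x xs ih =>
    simp only [List.foldl_cons, m2step]
    split <;> apply ih

-- ===== VERDICT (by name: the statement is the Claim_ definition above) =====
theorem mode_smooth_spec : Claim_equal_mode_smooth := by
  unfold Claim_equal_mode_smooth
  intro values _
  unfold Spec_mode_smooth mode_smooth mode_smooth_alt
  by_cases hne : values = []
  · simp [hne]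
  · simp only [if_neg hne]
    have hmemD : ∀ x, x ∈ PySem.Set.ofList values ↔ x ∈ values :=
      fun x => PySem.Set.mem_ofList values x
    obtain ⟨v0, vs0, hv0⟩ := List.exists_cons_of_ne_nil hne
    have hv0mem : v0 ∈ values := hv0 ▸ List.mem_cons_self
    have hDne : PySem.Set.ofList values ≠ [] := by
      intro h
      exact absurd ((hmemD v0).mpr hv0mem) (by simp [h])
    have hvals : (PySem.Dict.counter values).values
        = (PySem.Set.ofList values).map (fun k => ((List.count k values : Int))) := by
      simp only [PySem.Dict.values, PySem.Dict.items_counter, List.map_map]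
      rfl
    have hmaxne : (PySem.Dict.counter values).values ≠ [] := by
      rw [hvals]
      simpa using hDne
    obtain ⟨M, hM⟩ : ∃ M, PySem.List.max? (PySem.Dict.counter values).values (fun c => c)
        = some M := by
      cases h : PySem.List.max? (PySem.Dict.counter values).values (fun c => c) with
      | none => exact absurd ((PySem.List.max?_eq_none_iff _ _).mp h) hmaxne
      | some M => exact ⟨M, rfl⟩
    -- M is attained and is an upper bound of all counts
    obtain ⟨w, hwD, hwM⟩ : ∃ w ∈ values, ((List.count w values : Int)) = M := by
      have := PySem.List.max?_mem hM
      rw [hvals] at this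
      obtain ⟨k, hk, hkM⟩ := List.mem_map.mp this
      exact ⟨k, (hmemD k).mp hk, hkM⟩
    have hMub : ∀ u ∈ values, ((List.count u values : Int)) ≤ M := by
      intro u hu
      have hmem : ((List.count u values : Int)) ∈ (PySem.Dict.counter values).values := by
        rw [hvals]
        exact List.mem_map.mpr ⟨u, (hmemD u).mpr hu, rfl⟩
      exact PySem.List.max?_isMax hM _ hmem
    -- the candidate test is exactly "count = M" on elements of values
    have hcand : ∀ v ∈ values,
        ((((PySem.Dict.counter values).items.filter (fun p => p.2 == M)).map
          (fun p => p.1)).contains v = true ↔ ((List.count v values : Int)) = M) := by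
      intro v hv
      rw [List.contains_iff_mem]
      constructor
      · rintro hvm
        obtain ⟨p, hpmem, rfl⟩ := List.mem_map.mp hvm
        obtain ⟨hpitems, hpM⟩ := List.mem_filter.mp hpmem
        rw [PySem.Dict.items_counter] at hpitems
        obtain ⟨k, _, rfl⟩ := List.mem_map.mp hpitems
        exact beq_iff_eq.mp hpM
      · intro hvM
        refine List.mem_map.mpr ⟨(v, (List.count v values : Int)), List.mem_filter.mpr ⟨?_, ?_⟩, rfl⟩
        · rw [PySem.Dict.items_counter]
          exact List.mem_map.mpr ⟨v, (hmemD v).mpr hv, rfl⟩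
        · exact beq_iff_eq.mpr hvM
    -- A's reverse scan succeeds
    obtain ⟨r, hr⟩ : ∃ r, values.reverse.find?
        (fun v => (((PySem.Dict.counter values).items.filter (fun p => p.2 == M)).map
          (fun p => p.1)).contains v) = some r := by
      rw [← Option.isSome_iff_exists, List.find?_isSome]
      exact ⟨w, List.mem_reverse.mpr hwD, (hcand w hwD).mpr hwM⟩
    have hrval : r ∈ values := List.mem_reverse.mp (List.mem_of_find?_eq_some hr)
    have hrM : ((List.count r values : Int)) = M := (hcand r hrval).mp (List.find?_some hr)
    have hrmin := find?_idxOf_min _ _ _ hr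
    -- B's fold and keyed max
    rw [pairFold_split, PySem.Dict.foldl_insert_getD_add_one_eq_counter]
    obtain ⟨k0, ks, hk⟩ := List.exists_cons_of_ne_nil hDne
    obtain ⟨m, hm⟩ : ∃ m, ((PySem.Dict.counter values).keys).foldl
        (m2step (fun v => (PySem.Dict.counter values).getD v 0)
          (fun v => ((PySem.List.enumerate values).foldl
            (fun d iv => d.insert iv.2 iv.1) PySem.Dict.empty).getD v 0)) none = some m := by
      rw [PySem.Dict.keys_counter, hk, List.foldl_cons]
      exact max2fold_isSome _ _ _ _
    obtain ⟨-, -, hmmax⟩ := max2fold_max _ _ _ _ _ hm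
    have hmD : m ∈ (PySem.Dict.counter values).keys := by
      rcases (max2fold_max _ _ _ _ _ hm).1 with h | h
      · exact absurd h (by simp)
      · exact h
    have hmval : m ∈ values := by
      rw [PySem.Dict.keys_counter] at hmD
      exact (hmemD m).mp hmD
    -- evaluate the two keys on elements of values
    have hk1 : ∀ y, (PySem.Dict.counter values).getD y 0 = ((List.count y values : Int)) :=
      fun y => PySem.Dict.getD_counter values y
    have hk2 : ∀ y ∈ values, ((PySem.List.enumerate values).foldl
        (fun d iv => d.insert iv.2 iv.1) PySem.Dict.empty).getD y 0
        = 0 + (values.length : Int) - 1 - ((values.reverse.idxOf y : Int)) := by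
      intro y hy
      show (((PySem.List.enumerate values).foldl
        (fun d iv => d.insert iv.2 iv.1) PySem.Dict.empty).get? y).getD 0 = _
      rw [lastFold_get? values 0 PySem.Dict.empty y, if_pos hy]
      rfl
    -- r and m have the same last-occurrence index, hence are equal
    have hrD : r ∈ (PySem.Dict.counter values).keys := by
      rw [PySem.Dict.keys_counter]
      exact (hmemD r).mpr hrval
    have hlex := hmmax r hrD
    unfold LexLE at hlex
    simp only [hk1] at hlex
    have hmub := hMub m hmval
    have hmM : ((List.count m values : Int)) = M := by omega
    have hk2rm : ((PySem.List.enumerate values).foldl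
          (fun d iv => d.insert iv.2 iv.1) PySem.Dict.empty).getD r 0
        ≤ ((PySem.List.enumerate values).foldl
          (fun d iv => d.insert iv.2 iv.1) PySem.Dict.empty).getD m 0 := by
      rcases hlex with h | h
      · omega
      · exact h.2
    rw [hk2 r hrval, hk2 m hmval] at hk2rm
    have hidx1 : values.reverse.idxOf m ≤ values.reverse.idxOf r := by omega
    have hidx2 : values.reverse.idxOf r ≤ values.reverse.idxOf m :=
      hrmin m (List.mem_reverse.mpr hmval) ((hcand m hmval).mpr hmM)
    have hrm : r = m :=
      (List.idxOf_inj (List.mem_reverse.mpr hrval)).mp (Nat.le_antisymm hidx2 hidx1)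
    -- finish: reduce both sides
    rw [hM]
    simp only [hr]
    rw [max2?_eq_foldl_m2step, hm, hrm]
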